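/- GENERATED by farm/mkstatement.py from design/units.tsv (unit `decode_residue.1d`) and the assertions of Vorbis/Spec/DecodeResidue1.lean — do not edit.
   THE STATEMENT of the proof unit `decode_residue.1d`: segment 1d of `decode_residue` (11 instructions; entries 0x10edca;
   exits 0x10ee39; ranges 0x10edca-0x10ee00)
   takes each of its entry assertions to one of its exit assertions (`Vorbis.Spec.DecodeResidue.Seg1d`), given the contracts of its callees.
   What the names mean: Vorbis/Spec/Basic.lean (the shared hypotheses), Vorbis/Spec/DecodeResidue1.lean (the assertions). The theorem to prove:
   `theorem decode_residue_1d_ok : Vorbis.Spec.decode_residue_1d.Statement`. -/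
import Vorbis.Spec.Alloc
import Vorbis.Spec.DecodeResidue1
namespace Vorbis.Spec.decode_residue_1d
open X86 X86.User Asan

/-- The statement of unit `decode_residue.1d`. -/
def Statement : Prop :=
  ∀ (Lay : Layout) (_hLay : Lay.hi = 0x1000000) (μ : Microarch) (_hμ : UserX.MicroOK μ) (u₀ : State)
    (_hcode : HasCodeNat Lay u₀ Vorbis.L.decode_residue.entry Vorbis.Code.code_decode_residue.nat Vorbis.L.decode_residue.size)
    (_h_make_block_array : ∀ (others : List Obj) (frames : List (Nat × FrameLayout)), Calls Lay μ Vorbis.WayInv (Vorbis.conv u₀) Vorbis.L.make_block_array.entry (Vorbis.Spec.make_block_array.spec others frames)),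
    Vorbis.Spec.DecodeResidue.Seg1d Lay μ u₀

end Vorbis.Spec.decode_residue_1d
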